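-- pv_equiv track=rewrite | github.com/TDK1969/My-Leetcode | match/2023.4.15 pdd/3.py | solution
-- ===== SOURCE A (Python) =====
-- from typing import List
-- import bisect
--
-- def solution(nums: List[int]) -> List[int]:
--     s = sum(nums)
--     presum = []
--     for num in nums:
--         if not presum:
--             presum.append(num)
--         else:
--             presum.append(presum[-1] + num)
--
--     presum_set = set(presum)
--
--     def sliceSubSumK(k: int) -> int:
--         # 将nums数组进行子数组和为k的完美拆分，如果能够完美拆分，返回厚度，否则返回0
--         ans = 0
--         p = -1
--         for i in range(1, (s // k) + 1):
--             q = bisect.bisect_left(presum, i * k)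
--             if presum[q] != i * k:
--                 return 0
--             ans = max(ans, q - p)
--             p = q
--         return ans
--
--
--     # 每个子数组的和>=m
--     ans = [len(nums), s]
--     m = max(nums)
--     for i in presum_set:
--         if i >= m and s % i == 0:
--             res = sliceSubSumK(i)
--             if res != 0 and res < ans[0]:
--                 ans[0], ans[1] = res, i
--     return ans
-- ===== SOURCE B (Python) =====
-- from typing import List
--
--
-- def solution(nums: List[int]) -> List[int]:
--     s = sum(nums)
--     presum = []
--     acc = 0
--     for num in nums:
--         acc += num
--         presum.append(acc)
--     m = max(nums)
--
--     def thickness(k: int) -> int: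
--         # one linear sweep over nums: no binary search, no prefix lookups
--         best = 0
--         p = -1
--         target = k
--         run = 0
--         for i, num in enumerate(nums):
--             run += num
--             if run == target:
--                 best = max(best, i - p)
--                 p = i
--                 target += k
--             elif run > target:
--                 return 0
--         if target != s + k:
--             return 0
--         return best
--
--     ans = [len(nums), s]
--     for k in set(presum):
--         if k >= m and s % k == 0:
--             res = thickness(k)
--             if res != 0 and res < ans[0]:
--                 ans = [res, k]
--     return ans
-- ===== Notes on version B (the rewrite author's own statement) =====
-- stated objective: alternative
-- what changed: B replaces the inner per-multiple binary search (bisect_left on the prefix-sum array) by a single linear sweep over nums that accumulates a running sum and a moving target k, 2k, ..., recording boundary gaps as it walks; the outer candidate enumeration is kept.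
-- outside the precondition, e.g. on solution([2, -1, 1]): A returns [3, 2], B returns [1, 2]; on solution([]): A raises ValueError, B raises ValueError; on solution([0]): A raises ZeroDivisionError, B raises ZeroDivisionError
import Mathlib
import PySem

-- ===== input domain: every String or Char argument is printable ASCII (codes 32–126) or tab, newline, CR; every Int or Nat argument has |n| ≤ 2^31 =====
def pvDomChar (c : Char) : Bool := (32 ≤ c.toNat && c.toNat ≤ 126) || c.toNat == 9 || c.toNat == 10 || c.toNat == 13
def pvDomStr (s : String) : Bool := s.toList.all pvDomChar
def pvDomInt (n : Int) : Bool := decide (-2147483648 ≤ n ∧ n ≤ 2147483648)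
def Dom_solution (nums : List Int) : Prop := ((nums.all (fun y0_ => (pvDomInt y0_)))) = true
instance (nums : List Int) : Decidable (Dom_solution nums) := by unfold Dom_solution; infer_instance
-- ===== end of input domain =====

-- B replaces the inner per-multiple binary search (bisect_left on the prefix-sum array) by a single
-- linear sweep over nums with a running sum and a moving target (objective: alternative algorithm for
-- the feasibility/thickness check; same outer enumeration of candidate block sums).

-- ===== PORT A =====
-- inner loop of A's sliceSubSumK: for i in range(…): q = bisect_left…; early 'return 0'; ans = max(ans, q-p); p = q
def solutionSliceLoop (presum : List Int) (k : Int) : List Int → Int → Int → Int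
  | [], ans, _ => ans
  | i :: is, ans, p =>
    let q : Int := ((PySem.List.bisectLeft presum (i * k) : Nat) : Int)
    if PySem.List.pyGetD presum q 0 ≠ i * k then 0
    else solutionSliceLoop presum k is (max ans (q - p)) q

def solution (nums : List Int) : List Int :=
  let s := nums.sum
  let presum := nums.foldl (fun ps num =>
      if ps = [] then ps ++ [num] else ps ++ [PySem.List.pyGetD ps (-1) 0 + num]) []
  let presumSet : PySem.Set Int := PySem.Set.ofList presum
  let m := PySem.List.maxD nums (fun x => x) 0
  let ans := presumSet.foldl (fun ans i =>
      if m ≤ i ∧ PySem.Int.mod s i = 0 then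
        let res := solutionSliceLoop presum i
            (PySem.List.pyRange 1 (PySem.Int.floordiv s i + 1) 1) 0 (-1)
        if res ≠ 0 ∧ res < ans.1 then (res, i) else ans
      else ans)
    ((nums.length : Int), s)
  [ans.1, ans.2]

-- ===== PORT B =====
-- B's thickness: one linear sweep over the enumerated nums with a running sum and a moving target
-- (early 'return 0' on overshoot; final check that the last target is s + k)
def solutionAltSweep (s k : Int) : List (Int × Int) → Int → Int → Int → Int → Int
  | [], best, _p, target, _run => if target ≠ s + k then 0 else best
  | (i, num) :: rest, best, p, target, run =>
    let run' := run + num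
    if run' = target then solutionAltSweep s k rest (max best (i - p)) i (target + k) run'
    else if target < run' then 0
    else solutionAltSweep s k rest best p target run'

def solution_alt (nums : List Int) : List Int :=
  let s := nums.sum
  let presum := (nums.foldl (fun (st : List Int × Int) num =>
      (st.1 ++ [st.2 + num], st.2 + num)) ([], 0)).1
  let m := PySem.List.maxD nums (fun x => x) 0
  let ans := (PySem.Set.ofList presum).foldl (fun (ans : Int × Int) k =>
      if m ≤ k ∧ PySem.Int.mod s k = 0 then
        let res := solutionAltSweep s k (PySem.List.enumerate nums 0) 0 (-1) k 0
        if res ≠ 0 ∧ res < ans.1 then (res, k) else ans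
      else ans) ((nums.length : Int), s)
  [ans.1, ans.2]

-- ===== PRECONDITION & SPEC =====
-- Pre_ keeps the inputs whose prefix-sum array is sorted with a positive maximum — some element is
-- positive and no element after the first is negative: on the empty list A raises ValueError
-- (max([])), on all-non-positive lists A can raise ZeroDivisionError or IndexError, and on lists
-- with a negative element past the first position the prefix-sum array is not sorted, so A's bisect
-- probes (and B's monotone sweep) both rest on a broken assumption and any value A still returns
-- there is an accident of the binary-search probe sequence.
def Pre_solution (nums : List Int) : Prop := (∃ x ∈ nums, 0 < x) ∧ (∀ x ∈ nums.tail, 0 ≤ x)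
instance (nums : List Int) : Decidable (Pre_solution nums) := by unfold Pre_solution; infer_instance
def pvWitness_solution : List Int := [1, 2, 3]

def Spec_solution (nums : List Int) (out : List Int) : Prop := out = solution_alt nums
instance (nums : List Int) (out : List Int) : Decidable (Spec_solution nums out) := by unfold Spec_solution; infer_instance

-- ===== CLAIM (what is proved, stated in full; the proofs are below) =====
def Claim_equal_solution : Prop := ∀ (nums : List Int), Dom_solution nums → Pre_solution nums → Spec_solution nums (solution nums)

-- ===== LEMMAS AND PROOFS =====

-- proof-side view of the prefix sums: presums acc l = [acc+l0, acc+l0+l1, …]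
def presums (acc : Int) : List Int → List Int
  | [] => []
  | n :: r => (acc + n) :: presums (acc + n) r

-- A's presum-building fold (append num or presum[-1]+num) equals B's running-accumulator fold.
lemma presum_eq (nums : List Int) : ∀ (ps : List Int) (acc : Int),
    (ps = [] → acc = 0) → (ps ≠ [] → PySem.List.pyGetD ps (-1) 0 = acc) →
    nums.foldl (fun ps num =>
        if ps = [] then ps ++ [num] else ps ++ [PySem.List.pyGetD ps (-1) 0 + num]) ps
      = (nums.foldl (fun (st : List Int × Int) num =>
          (st.1 ++ [st.2 + num], st.2 + num)) (ps, acc)).1 := by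
  induction nums with
  | nil => intro ps acc _ _; rfl
  | cons num rest ih =>
    intro ps acc h0 hlast
    simp only [List.foldl_cons]
    by_cases hps : ps = []
    · subst hps
      have hacc := h0 rfl; subst hacc
      rw [if_pos rfl]
      have := ih [num] (0 + num) (by simp) (by
        intro _
        simp [PySem.List.pyGetD, PySem.List.pyGet?, PySem.List.pyIdx?])
      simpa using this
    · rw [if_neg hps, hlast hps]
      exact ih (ps ++ [acc + num]) (acc + num) (by simp) (by
        intro _
        simp [PySem.List.pyGetD, PySem.List.pyGet?, PySem.List.pyIdx?])

-- B's running-accumulator fold builds exactly ps ++ presums acc nums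
lemma foldB_presums (nums : List Int) : ∀ (ps : List Int) (acc : Int),
    nums.foldl (fun (st : List Int × Int) num =>
        (st.1 ++ [st.2 + num], st.2 + num)) (ps, acc)
      = (ps ++ presums acc nums, acc + nums.sum) := by
  induction nums with
  | nil => intro ps acc; simp [presums]
  | cons num rest ih =>
    intro ps acc
    simp only [List.foldl_cons, presums, ih]
    simp only [List.sum_cons, Prod.mk.injEq]
    constructor
    · simp
    · ring

lemma presums_ge (nums : List Int) : ∀ (acc : Int), (∀ x ∈ nums, 0 ≤ x) →
    ∀ y ∈ presums acc nums, acc ≤ y := by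
  induction nums with
  | nil => intro acc _ y hy; simp [presums] at hy
  | cons num rest ih =>
    intro acc h y hy
    have hnum : 0 ≤ num := h num (by simp)
    rcases List.mem_cons.mp hy with rfl | hy'
    · omega
    · have := ih (acc + num) (fun x hx => h x (by simp [hx])) y hy'
      omega

lemma presums_le_sum (nums : List Int) : ∀ (acc : Int), (∀ x ∈ nums, 0 ≤ x) →
    ∀ y ∈ presums acc nums, y ≤ acc + nums.sum := by
  induction nums with
  | nil => intro acc _ y hy; simp [presums] at hy
  | cons num rest ih =>
    intro acc h y hy
    have hrest : ∀ x ∈ rest, 0 ≤ x := fun x hx => h x (by simp [hx])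
    have hsum : 0 ≤ rest.sum := List.sum_nonneg hrest
    rcases List.mem_cons.mp hy with rfl | hy'
    · simp; omega
    · have := ih (acc + num) hrest y hy'
      simp at this ⊢; omega

lemma presums_pairwise (nums : List Int) : ∀ (acc : Int), (∀ x ∈ nums, 0 ≤ x) →
    (presums acc nums).Pairwise (· ≤ ·) := by
  induction nums with
  | nil => intro acc _; simp [presums]
  | cons num rest ih =>
    intro acc h
    have hrest : ∀ x ∈ rest, 0 ≤ x := fun x hx => h x (by simp [hx])
    refine List.pairwise_cons.mpr ⟨fun y hy => presums_ge rest (acc + num) hrest y hy, ih (acc + num) hrest⟩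

lemma presums_sum_mem (nums : List Int) : ∀ (acc : Int), nums ≠ [] →
    acc + nums.sum ∈ presums acc nums := by
  induction nums with
  | nil => intro acc h; exact absurd rfl h
  | cons num rest ih =>
    intro acc _
    by_cases hr : rest = []
    · subst hr; simp [presums]
    · have := ih (acc + num) hr
      simp only [presums, List.mem_cons, List.sum_cons]
      right
      have heq : acc + (num + rest.sum) = acc + num + rest.sum := by ring
      rw [heq]
      exact this

-- bisect_left on a (non-strictly) sorted list, pinned to the first index whose value reaches t
lemma bisectLeft_eq (P : List Int) (t : Int) (hs : P.Pairwise (· ≤ ·)) (i0 : Nat)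
    (h : i0 < P.length) (hlt : ∀ (idx : Nat) (h2 : idx < P.length), idx < i0 → P[idx] < t)
    (hge : t ≤ P[i0]) : PySem.List.bisectLeft P t = i0 := by
  obtain ⟨hq, hlow, hhigh⟩ := PySem.List.bisectLeft_spec P t hs
  set q := PySem.List.bisectLeft P t with hqdef
  by_cases h1 : q < i0
  · have hq1 : q < P.length := by omega
    have ha := hhigh q hq1 (le_refl q)
    have hb := hlt q hq1 h1
    omega
  · by_cases h2 : i0 < q
    · have := hlow i0 h h2
      omega
    · omega

-- main bridge: B's sweep from position i0 (with remaining list L, running sum run, target j*k)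
-- computes exactly A's bisect loop over the remaining multiples j, j+1, …, cnt
lemma sweep_eq_slice (P : List Int) (k s : Int) (hk : 0 < k)
    (hsorted : P.Pairwise (· ≤ ·)) (hle : ∀ x ∈ P, x ≤ s) (hsmem : s ∈ P)
    (cnt : Int) (hs : s = cnt * k) :
    ∀ (L : List Int) (i0 : Nat) (run j best p : Int),
      presums run L = P.drop i0 → 1 ≤ j → j ≤ cnt + 1 →
      (∀ (idx : Nat) (h2 : idx < P.length), idx < i0 → P[idx] < j * k) →
      solutionAltSweep s k (PySem.List.enumerate L (i0 : Int)) best p (j * k) run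
        = solutionSliceLoop P k (PySem.List.pyRange j (cnt + 1) 1) best p := by
  intro L
  induction L with
  | nil =>
    intro i0 run j best p hdrop hj1 hj2 hinv
    have hlen : P.length ≤ i0 := List.drop_eq_nil_iff.mp (by simpa [presums] using hdrop.symm)
    obtain ⟨idx, hidx, hPidx⟩ := List.mem_iff_getElem.mp hsmem
    have hslt : s < j * k := hPidx ▸ hinv idx hidx (by omega)
    have hcj : cnt < j := (Int.mul_lt_mul_right hk).mp (by omega)
    have hjeq : j = cnt + 1 := by omega
    have htgt : j * k = s + k := by rw [hjeq, add_mul, one_mul, ← hs]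
    rw [PySem.List.pyRange_one_eq_nil (by omega : cnt + 1 ≤ j)]
    simp [PySem.List.enumerate, solutionAltSweep, solutionSliceLoop, htgt]
  | cons num rest ih =>
    intro i0 run j best p hdrop hj1 hj2 hinv
    have hne : P.drop i0 ≠ [] := by rw [← hdrop]; simp [presums]
    have hi0 : i0 < P.length := by
      by_contra hcon
      exact hne (List.drop_eq_nil_iff.mpr (by omega))
    have hcons := List.drop_eq_getElem_cons hi0
    rw [hcons, presums] at hdrop
    have hv : P[i0] = run + num := by
      have := hdrop
      injection this with h1 h2
      exact h1.symm
    have hrest : presums (run + num) rest = P.drop (i0 + 1) := by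
      injection hdrop with h1 h2
    have hvmem : P[i0] ∈ P := List.getElem_mem hi0
    have hvle : run + num ≤ s := hv ▸ hle _ hvmem
    rw [PySem.List.enumerate_cons]
    by_cases hhit : run + num = j * k
    · -- exact hit: boundary at i0
      have hjcnt : j ≤ cnt := Int.le_of_mul_le_mul_right (by omega) hk
      have hq : PySem.List.bisectLeft P (j * k) = i0 :=
        bisectLeft_eq P (j * k) hsorted i0 hi0 hinv (by omega)
      rw [PySem.List.pyRange_one_cons (by omega : j < cnt + 1)]
      simp only [solutionAltSweep, solutionSliceLoop, hq, if_pos hhit]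
      rw [PySem.List.pyGetD_eq_getElem P 0 (by positivity) (by exact_mod_cast hi0)]
      rw [if_neg (by simp only [Int.toNat_natCast]; omega)]
      have harith : j * k + k = (j + 1) * k := by ring
      have hstep := ih (i0 + 1) (run + num) (j + 1) (max best ((i0 : Int) - p)) (i0 : Int)
        hrest (by omega) (by omega)
        (fun idx h2 hidx => by
          rcases Nat.lt_succ_iff_lt_or_eq.mp hidx with hlt' | heq'
          · have := hinv idx h2 hlt'
            nlinarith
          · subst heq'
            rw [hv]
            nlinarith)
      rw [harith]
      rw [← hstep]
      push_cast
      ring_nf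
    · by_cases hover : j * k < run + num
      · -- overshoot: both sides return 0
        have hjcnt : j ≤ cnt := by
          have : j * k < cnt * k := by omega
          have := (Int.mul_lt_mul_right hk).mp this
          omega
        have hq : PySem.List.bisectLeft P (j * k) = i0 :=
          bisectLeft_eq P (j * k) hsorted i0 hi0 hinv (by omega)
        rw [PySem.List.pyRange_one_cons (by omega : j < cnt + 1)]
        simp only [solutionAltSweep, solutionSliceLoop, hq]
        rw [if_neg hhit, if_pos hover]
        rw [PySem.List.pyGetD_eq_getElem P 0 (by positivity) (by exact_mod_cast hi0)]
        rw [if_pos (by simp only [Int.toNat_natCast]; omega)]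
      · -- below target: sweep advances, A's loop untouched
        have hlow : run + num < j * k := by omega
        simp only [solutionAltSweep, if_neg hhit, if_neg (by omega : ¬ j * k < run + num)]
        have hstep := ih (i0 + 1) (run + num) j best p hrest hj1 hj2
          (fun idx h2 hidx => by
            rcases Nat.lt_succ_iff_lt_or_eq.mp hidx with hlt' | heq'
            · exact hinv idx h2 hlt'
            · subst heq'; omega)
        rw [← hstep]
        push_cast
        ring_nf

theorem solution_eq_alt (nums : List Int) (hpre : Pre_solution nums) :
    solution nums = solution_alt nums := by
  obtain ⟨⟨x, hxmem, hxpos⟩, htail⟩ := hpre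
  have hne : nums ≠ [] := fun h => by subst h; simp at hxmem
  obtain ⟨n0, rest, rfl⟩ := List.exists_cons_of_ne_nil hne
  have h0 : ∀ y ∈ rest, (0 : Int) ≤ y := by simpa using htail
  obtain ⟨m0, hm0⟩ : ∃ m0, PySem.List.max? (n0 :: rest) (fun x => x) = some m0 := by
    cases hmax : PySem.List.max? (n0 :: rest) (fun x => x) with
    | none => exact absurd ((PySem.List.max?_eq_none_iff _ _).mp hmax) hne
    | some m0 => exact ⟨m0, rfl⟩
  have hmpos : 0 < PySem.List.maxD (n0 :: rest) (fun x => x) 0 := by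
    have := PySem.List.max?_isMax hm0 x hxmem
    simp only [PySem.List.maxD, hm0, Option.getD_some]
    omega
  simp only [solution, solution_alt]
  rw [presum_eq (n0 :: rest) [] 0 (fun _ => rfl) (fun h => absurd rfl h)]
  rw [foldB_presums (n0 :: rest) [] 0]
  simp only [List.nil_append]
  have hsorted : (presums 0 (n0 :: rest)).Pairwise (· ≤ ·) := by
    simp only [presums]
    exact List.pairwise_cons.mpr
      ⟨fun y hy => presums_ge rest (0 + n0) h0 y hy, presums_pairwise rest (0 + n0) h0⟩
  have hle : ∀ y ∈ presums 0 (n0 :: rest), y ≤ (n0 :: rest).sum := by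
    intro y hy
    have hsum0 : (0 : Int) ≤ rest.sum := List.sum_nonneg h0
    simp only [presums, List.mem_cons] at hy
    rcases hy with rfl | hy'
    · simp; omega
    · have := presums_le_sum rest (0 + n0) h0 y hy'
      simp at this ⊢; omega
  have hsmem : (n0 :: rest).sum ∈ presums 0 (n0 :: rest) := by
    have := presums_sum_mem (n0 :: rest) 0 hne
    simpa using this
  refine congrArg (fun a : Int × Int => [a.1, a.2])
    (PySem.List.foldl_congr_mem _ _ _ _ ?_)
  intro acc k hkmem
  by_cases hg : PySem.List.maxD (n0 :: rest) (fun x => x) 0 ≤ k ∧ PySem.Int.mod (n0 :: rest).sum k = 0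
  · rw [if_pos hg, if_pos hg]
    obtain ⟨hmk, hmod⟩ := hg
    have hkpos : 0 < k := by omega
    have hkP : k ∈ presums 0 (n0 :: rest) := (PySem.Set.mem_ofList _ k).mp hkmem
    have hks : k ≤ (n0 :: rest).sum := hle k hkP
    have hcnt : (n0 :: rest).sum = PySem.Int.floordiv (n0 :: rest).sum k * k := by
      have := PySem.Int.floordiv_mul_add_mod (n0 :: rest).sum k
      omega
    have hcnt1 : 1 ≤ PySem.Int.floordiv (n0 :: rest).sum k := by
      refine Int.le_of_mul_le_mul_right ?_ hkpos
      omega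
    have hbr := sweep_eq_slice (presums 0 (n0 :: rest)) k (n0 :: rest).sum hkpos hsorted hle hsmem
      (PySem.Int.floordiv (n0 :: rest).sum k) hcnt
      (n0 :: rest) 0 0 1 0 (-1) (by simp) le_rfl (by omega)
      (by intro idx _ h; omega)
    simp only [one_mul, Nat.cast_zero] at hbr
    rw [← hbr]
  · rw [if_neg hg, if_neg hg]

-- ===== VERDICT (by name: the statement is the Claim_ definition above) =====
theorem solution_spec : Claim_equal_solution := by
  intro nums _ hpre
  exact solution_eq_alt nums hpre
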